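-- pv_equiv track=rewrite | github.com/21MH1A0599/codemind-python | Balanced_Array.py | balsum
-- ===== SOURCE A (Python) =====
-- def balsum(a):
--     t=sum(a)
--     ad=0
--     for i in a:
--         if ad==t-i-ad:
--             return "YES"
--         ad+=i
--     return "NO"
-- ===== SOURCE B (Python) =====
-- def balsum(a):
--     for i in range(len(a)):
--         if sum(a[:i]) == sum(a[i+1:]):
--             return "YES"
--     return "NO"
-- ===== Notes on version B (the rewrite author's own statement) =====
-- stated objective: simpler
-- what changed: B drops the total and running accumulator and instead, for each index, directly compares sum(a[:i]) with sum(a[i+1:]) via fresh slice sums.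
import Mathlib
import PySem

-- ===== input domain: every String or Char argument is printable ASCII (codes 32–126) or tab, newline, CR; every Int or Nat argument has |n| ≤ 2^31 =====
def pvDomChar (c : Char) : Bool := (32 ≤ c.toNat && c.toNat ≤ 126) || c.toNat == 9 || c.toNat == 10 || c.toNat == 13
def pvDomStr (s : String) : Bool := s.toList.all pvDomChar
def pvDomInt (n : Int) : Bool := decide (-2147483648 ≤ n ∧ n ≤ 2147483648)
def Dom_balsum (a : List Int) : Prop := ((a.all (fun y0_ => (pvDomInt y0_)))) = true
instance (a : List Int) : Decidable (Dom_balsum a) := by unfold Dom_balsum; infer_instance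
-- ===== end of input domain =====

-- B replaces A's running accumulator with per-index fresh slice sums (simpler, repeated-scan form).

-- ===== PORT A =====
-- for i in a: if ad == t-i-ad: return "YES"; ad += i  — early return via structural recursion
def balsumGo (t ad : Int) (a : List Int) : String :=
  match a with
  | [] => "NO"
  | i :: rest => if ad = t - i - ad then "YES" else balsumGo t (ad + i) rest

def balsum (a : List Int) : String := balsumGo a.sum 0 a

-- ===== PORT B =====
-- for i in range(len(a)): if sum(a[:i]) == sum(a[i+1:]): return "YES"  — index recursion
def balsumAltGo (a : List Int) : List Nat → String
  | [] => "NO"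
  | i :: rest =>
    if (PySem.List.slice a none (some ((i : Nat) : Int))).sum
        = (PySem.List.slice a (some ((i + 1 : Nat) : Int)) none).sum then "YES"
    else balsumAltGo a rest

def balsum_alt (a : List Int) : String := balsumAltGo a (List.range a.length)

-- ===== PRECONDITION & SPEC =====
def Spec_balsum (a : List Int) (out : String) : Prop := out = balsum_alt a
instance (a : List Int) (out : String) : Decidable (Spec_balsum a out) := by unfold Spec_balsum; infer_instance

-- ===== CLAIM (what is proved, stated in full; the proofs are below) =====
def Claim_equal_balsum : Prop := ∀ (a : List Int), Dom_balsum a → Spec_balsum a (balsum a)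

-- ===== LEMMAS AND PROOFS =====
lemma balsum_go_eq (rest : List Int) : ∀ (pre : List Int),
    balsumGo (pre ++ rest).sum pre.sum rest
      = balsumAltGo (pre ++ rest) (List.range' pre.length rest.length) := by
  induction rest with
  | nil =>
    intro pre
    simp [balsumGo, balsumAltGo]
  | cons x r ih =>
    intro pre
    rw [show (x :: r).length = r.length + 1 from rfl, List.range'_succ, balsumAltGo]
    rw [PySem.List.slice_to_natCast, PySem.List.slice_from_natCast]
    have htake : (pre ++ x :: r).take pre.length = pre := by
      simp
    have hdrop : (pre ++ x :: r).drop (pre.length + 1) = r := by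
      rw [show pre.length + 1 = (pre ++ [x]).length by simp]
      rw [show pre ++ x :: r = (pre ++ [x]) ++ r by simp]
      simp
    rw [htake, hdrop]
    have hcond : (pre.sum = (pre ++ x :: r).sum - x - pre.sum) ↔ (pre.sum = r.sum) := by
      simp [List.sum_append]
      constructor <;> intro h <;> omega
    by_cases h : pre.sum = r.sum
    · rw [balsumGo, if_pos (hcond.mpr h), if_pos h]
    · rw [balsumGo, if_neg (fun hc => h (hcond.mp hc)), if_neg h]
      have := ih (pre ++ [x])
      simpa [List.sum_append] using this

-- ===== VERDICT (by name: the statement is the Claim_ definition above) =====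
theorem balsum_spec : Claim_equal_balsum := by
  intro a _
  unfold Spec_balsum balsum balsum_alt
  simpa [List.range_eq_range'] using balsum_go_eq a []
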